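-- pv_equiv track=rewrite | github.com/abhirs2183-sys/Vercel_App_Test | Datafix-Assembler/sql_processor.py | parse_set_clause
-- ===== SOURCE A (Python) =====
-- def parse_set_clause(set_clause):
--     updates = []
--     parts = smart_split_set_clause(set_clause)
--
--     for part in parts:
--         part = part.strip()
--         if '=' in part:
--             eq_pos = find_first_equals(part)
--             if eq_pos > 0:
--                 col_name = part[:eq_pos].strip()
--                 new_value = part[eq_pos + 1:].strip()
--                 updates.append((col_name, new_value))
--     return updates
--
-- def find_first_equals(s):
--     for i, char in enumerate(s):
--         if char == '=':
--             if i > 0 and s[i - 1] in '<>!':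
--                 continue
--             if i < len(s) - 1 and s[i + 1] == '=':
--                 continue
--             return i
--     return -1
--
-- def smart_split_set_clause(set_clause):
--     parts = []
--     current = []
--     paren_depth = 0
--     in_string = False
--     string_char = None
--
--     i = 0
--     while i < len(set_clause):
--         char = set_clause[i]
--
--         if not in_string and char in ("'", '"'):
--             in_string = True
--             string_char = char
--             current.append(char)
--         elif in_string and char == string_char:
--             in_string = False
--             string_char = None
--             current.append(char)
--         elif not in_string and char == '(':
--             paren_depth += 1
--             current.append(char)
--         elif not in_string and char == ')':
--             paren_depth -= 1
--             current.append(char)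
--         elif char == ',' and paren_depth == 0 and not in_string:
--             parts.append(''.join(current))
--             current = []
--         else:
--             current.append(char)
--
--         i += 1
--
--     if current:
--         parts.append(''.join(current))
--
--     return parts
-- ===== SOURCE B (Python) =====
-- # Single left-to-right scan (no intermediate parts list): splitting state
-- # (paren depth / quote mode) plus a per-segment column/value machine with a
-- # withheld-separator state that resolves operator forms (<=, >=, !=, ==) the way the
-- # original's per-part index scan does.
--
-- def _finalize(updates, col, val, sep, pending):
--     if pending:
--         sep = True            # '=' at segment end is a valid separator
--     if sep:
--         c = ''.join(col).strip()
--         if c: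
--             updates.append((c, ''.join(val).strip()))
--     return updates
--
-- def parse_set_clause(set_clause):
--     updates = []
--     col, val = [], []
--     sep = pending = False
--     prev = None
--     depth = 0
--     string_char = None
--     for ch in set_clause:
--         # resolve a withheld equals sign against its successor
--         if pending:
--             if ch == '=':
--                 col.append('=')       # '==': both chars belong to the column side
--             else:
--                 sep, pending = True, False
--         # splitting state, same quote/paren transitions as the original
--         split_here = False
--         if string_char is None and ch in ("'", '"'):
--             string_char = ch
--         elif string_char is not None and ch == string_char:
--             string_char = None
--         elif string_char is None and ch == '(':
--             depth += 1
--         elif string_char is None and ch == ')':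
--             depth -= 1
--         elif ch == ',' and depth == 0 and string_char is None:
--             split_here = True
--         if split_here:
--             updates = _finalize(updates, col, val, sep, pending)
--             col, val, sep, pending, prev = [], [], False, False, None
--             continue
--         # route the char
--         if not sep and ch == '=' and not (prev is not None and prev in '<>!'):
--             pending = True            # candidate separator, withheld
--         elif sep:
--             val.append(ch)
--         else:
--             col.append(ch)
--         prev = ch
--     return _finalize(updates, col, val, sep, pending)
-- ===== Notes on version B (the rewrite author's own statement) =====
-- stated objective: faster
-- what changed: Replaces A's three-phase pipeline (smart-split into a parts list, then per part strip + an index scan consulting s[i-1]/s[i+1] + slicing) by a single left-to-right character scan that routes each character into a column or value buffer, resolving the operator forms <=, >=, !=, == with a withheld-separator state instead of index lookahead and emitting a pair at each top-level comma.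
import Mathlib
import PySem

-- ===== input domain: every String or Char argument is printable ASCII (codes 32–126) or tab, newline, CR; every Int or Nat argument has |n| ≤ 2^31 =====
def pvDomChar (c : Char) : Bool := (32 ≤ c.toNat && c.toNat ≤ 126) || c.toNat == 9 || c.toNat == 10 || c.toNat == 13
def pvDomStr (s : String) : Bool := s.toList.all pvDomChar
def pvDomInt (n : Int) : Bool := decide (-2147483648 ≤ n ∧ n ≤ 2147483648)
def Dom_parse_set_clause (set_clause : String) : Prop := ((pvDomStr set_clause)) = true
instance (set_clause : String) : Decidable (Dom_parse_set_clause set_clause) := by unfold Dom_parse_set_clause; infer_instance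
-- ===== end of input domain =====

-- B replaces A's split-into-parts-then-rescan pipeline by a single character scan with a
-- withheld-separator (pending) state; one pass, no intermediate parts list (objective: faster, constant factor).

-- ===== PORT A =====
-- smart_split_set_clause's loop; `current` is the list of appended chars, ''.join(current) is String.ofList.
def pvSmartSplitGo (parts : List String) (current : List Char) (paren_depth : Int)
    (in_string : Bool) (string_char : Option Char) : List Char → List String
  | [] => if current ≠ [] then parts ++ [String.ofList current] else parts
  | ch :: rest =>
    if !in_string && (ch == '\'' || ch == '"') then
      pvSmartSplitGo parts (current ++ [ch]) paren_depth true (some ch) rest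
    else if in_string && some ch == string_char then
      pvSmartSplitGo parts (current ++ [ch]) paren_depth false none rest
    else if !in_string && ch == '(' then
      pvSmartSplitGo parts (current ++ [ch]) (paren_depth + 1) in_string string_char rest
    else if !in_string && ch == ')' then
      pvSmartSplitGo parts (current ++ [ch]) (paren_depth - 1) in_string string_char rest
    else if ch == ',' && paren_depth == 0 && !in_string then
      pvSmartSplitGo (parts ++ [String.ofList current]) [] paren_depth in_string string_char rest
    else
      pvSmartSplitGo parts (current ++ [ch]) paren_depth in_string string_char rest

def smart_split_set_clause (set_clause : String) : List String :=
  pvSmartSplitGo [] [] 0 false none set_clause.toList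

-- find_first_equals's enumerate loop; `prev` is s[i-1] (none exactly when i = 0, so the
-- Python guard 'i > 0 and s[i-1] in "<>!"' is 'prev is one of <,>,!'), and
-- 'i < len(s) - 1 and s[i+1] == "="' is 'rest.head? = some ='.
def pvFfeGo (prev : Option Char) (i : Nat) : List Char → Int
  | [] => -1
  | ch :: rest =>
    if ch == '=' then
      if prev == some '<' || prev == some '>' || prev == some '!' then
        pvFfeGo (some ch) (i + 1) rest
      else if rest.head? == some '=' then
        pvFfeGo (some ch) (i + 1) rest
      else (i : Int)
    else pvFfeGo (some ch) (i + 1) rest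

def find_first_equals (s : List Char) : Int := pvFfeGo none 0 s

def parse_set_clause (set_clause : String) : List (String × String) :=
  (smart_split_set_clause set_clause).foldl (fun updates part =>
    let p := PySem.Chars.strip part.toList                         -- part = part.strip()
    if PySem.Chars.isIn ['='] p then                               -- '=' in part
      let eq_pos := find_first_equals p
      if eq_pos > 0 then
        updates ++ [(String.ofList (PySem.Chars.strip (PySem.List.slice p none (some eq_pos))),
                     String.ofList (PySem.Chars.strip (PySem.List.slice p (some (eq_pos + 1)) none)))]
      else updates
    else updates) []

-- ===== PORT B =====
-- _finalize of Source B
def pvFinalize (updates : List (String × String)) (col val : List Char) (sep pending : Bool) :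
    List (String × String) :=
  let sep := if pending then true else sep
  if sep then
    let c := PySem.Chars.strip col
    if c ≠ [] then updates ++ [(String.ofList c, String.ofList (PySem.Chars.strip val))] else updates
  else updates

-- the single scan of Source B; the three helpers are the three commented blocks of its loop body
-- (resolve a withheld separator, splitting state, route the char), in order
def pvAltResolve (col : List Char) (sep pending : Bool) (ch : Char) : List Char × Bool × Bool :=
  if pending then
    (if ch == '=' then (col ++ ['='], sep, pending) else (col, true, false))
  else (col, sep, pending)

def pvAltSplitStep (depth : Int) (string_char : Option Char) (ch : Char) : Int × Option Char × Bool :=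
  if string_char == none && (ch == '\'' || ch == '"') then (depth, some ch, false)
  else if string_char != none && some ch == string_char then (depth, none, false)
  else if string_char == none && ch == '(' then (depth + 1, string_char, false)
  else if string_char == none && ch == ')' then (depth - 1, string_char, false)
  else if ch == ',' && depth == 0 && string_char == none then (depth, string_char, true)
  else (depth, string_char, false)

def pvAltRoute (col val : List Char) (sep pending : Bool) (prev : Option Char) (ch : Char) :
    List Char × List Char × Bool × Bool × Option Char :=
  if !sep && ch == '=' && !(prev == some '<' || prev == some '>' || prev == some '!') then
    (col, val, sep, true, some ch)
  else if sep then (col, val ++ [ch], sep, pending, some ch)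
  else (col ++ [ch], val, sep, pending, some ch)

def pvAltGo (updates : List (String × String)) (col val : List Char) (sep pending : Bool)
    (prev : Option Char) (depth : Int) (string_char : Option Char) : List Char → List (String × String)
  | [] => pvFinalize updates col val sep pending
  | ch :: rest =>
    let r := pvAltResolve col sep pending ch
    let s := pvAltSplitStep depth string_char ch
    if s.2.2 then
      pvAltGo (pvFinalize updates r.1 val r.2.1 r.2.2) [] [] false false none s.1 s.2.1 rest
    else
      let q := pvAltRoute r.1 val r.2.1 r.2.2 prev ch
      pvAltGo updates q.1 q.2.1 q.2.2.1 q.2.2.2.1 q.2.2.2.2 s.1 s.2.1 rest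

def parse_set_clause_alt (set_clause : String) : List (String × String) :=
  pvAltGo [] [] [] false false none 0 none set_clause.toList

-- ===== PRECONDITION & SPEC =====
def Spec_parse_set_clause (set_clause : String) (out : List (String × String)) : Prop := out = parse_set_clause_alt set_clause
instance (set_clause : String) (out : List (String × String)) : Decidable (Spec_parse_set_clause set_clause out) := by unfold Spec_parse_set_clause; infer_instance

-- ===== CLAIM (what is proved, stated in full; the proofs are below) =====
def Claim_equal_parse_set_clause : Prop := ∀ (set_clause : String), Dom_parse_set_clause set_clause → Spec_parse_set_clause set_clause (parse_set_clause set_clause)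

-- ===== LEMMAS AND PROOFS =====

def pvWs : Char → Bool := PySem.Chars.isspace
def pvPrevOk (p : Option Char) : Bool := !(p == some '<' || p == some '>' || p == some '!')

def pvSf : Option Char → List Char → Option Nat
  | _, [] => none
  | prev, ch :: rest =>
    if ch = '=' ∧ pvPrevOk prev = true ∧ rest.head? ≠ some '=' then some 0
    else (pvSf (some ch) rest).map (· + 1)

def pvPrevAfter (prev : Option Char) (x : List Char) : Option Char :=
  match x.getLast? with | some c => some c | none => prev

lemma pvSf_char : ∀ (x : List Char) (prev : Option Char) (j : Nat),
    pvSf prev x = some j → x[j]? = some '=' := by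
  intro x
  induction x with
  | nil => intro prev j h; simp [pvSf] at h
  | cons a x ih =>
    intro prev j h
    rw [pvSf] at h
    split at h
    · rename_i hc
      cases h
      simpa using hc.1
    · rcases Option.map_eq_some_iff.mp h with ⟨j', hj', rfl⟩
      simpa using ih (some a) j' hj'

lemma pvSf_lt {x : List Char} {prev : Option Char} {j : Nat} (h : pvSf prev x = some j) :
    j < x.length := by
  have := pvSf_char x prev j h
  exact List.getElem?_eq_some_iff.mp this |>.1

lemma pvSf_congr : ∀ (x : List Char) (p q : Option Char), pvPrevOk p = pvPrevOk q →
    pvSf p x = pvSf q x := by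
  intro x p q h
  cases x with
  | nil => rfl
  | cons a rest => rw [pvSf, pvSf, h]


lemma pvSf_nil (prev : Option Char) : pvSf prev [] = none := rfl
lemma pvSf_cons (prev : Option Char) (ch : Char) (rest : List Char) :
    pvSf prev (ch :: rest) =
      if ch = '=' ∧ pvPrevOk prev = true ∧ rest.head? ≠ some '=' then some 0
      else (pvSf (some ch) rest).map (· + 1) := rfl

lemma pvSf_append (x : List Char) (c : Char) : ∀ prev, pvSf prev (x ++ [c]) =
    match pvSf prev x with
    | some j => if j + 1 = x.length ∧ c = '=' then some (j + 1) else some j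
    | none => if c = '=' ∧ pvPrevOk (pvPrevAfter prev x) = true then some x.length else none := by
  induction x with
  | nil =>
    intro prev
    simp [pvSf_nil, List.nil_append, pvSf_cons, pvPrevAfter]
  | cons a x ih =>
    intro prev
    rw [List.cons_append, pvSf_cons, pvSf_cons]
    rcases x with _ | ⟨b, x'⟩
    · simp only [pvSf_nil, Option.map_none, List.nil_append, List.head?_cons, List.head?_nil]
      by_cases hp : pvPrevOk prev = true
      · by_cases ha : a = '='
        · by_cases hc : c = '='
          · subst ha; subst hc
            have hok : pvPrevOk (some '=') = true := by decide
            simp [hp, pvSf_cons, pvSf_nil, hok]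
          · simp [hp, ha, hc, pvSf_cons, pvSf_nil, pvPrevAfter]
        · simp [hp, ha, pvSf_cons, pvSf_nil, pvPrevAfter]
      · rw [Bool.not_eq_true] at hp
        simp [hp, pvSf_cons, pvSf_nil, pvPrevAfter]
    · have hh : (b :: x' ++ [c]).head? = some b := rfl
      rw [hh]
      by_cases hcond : a = '=' ∧ pvPrevOk prev = true ∧ (b :: x').head? ≠ some '='
      · have hcond' := hcond
        rw [List.head?_cons] at hcond'
        rw [if_pos hcond', if_pos hcond]
        have hlen : ¬ (0 + 1 = (a :: b :: x').length ∧ c = '=') := by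
          intro h
          have := h.1
          simp [List.length_cons] at this
        simp [hlen]
      · have hcond' := hcond
        rw [List.head?_cons] at hcond'
        rw [if_neg hcond', if_neg hcond]
        rw [ih (some a)]
        rcases hsf : pvSf (some a) (b :: x') with _ | j
        · have hgl2 : (a :: b :: x').getLast? = (b :: x').getLast? := by simp
          have hpa : pvPrevAfter (some a) (b :: x') = pvPrevAfter prev (a :: b :: x') := by
            unfold pvPrevAfter
            rw [hgl2]
            rcases hgl : (b :: x').getLast? with _ | g
            · exact absurd hgl (by simp)
            · rfl
          simp only [hsf, Option.map_none, hpa]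
          split
          · simp
          · simp
        · simp only [hsf, Option.map_some]
          by_cases hj : j + 1 = (b :: x').length ∧ c = '='
          · have hj2 : j + 1 + 1 = (a :: b :: x').length ∧ c = '=' := by
              refine ⟨?_, hj.2⟩
              have := hj.1
              simp only [List.length_cons] at this ⊢
              omega
            rw [if_pos hj, if_pos hj2]
            simp
          · have hj2 : ¬ (j + 1 + 1 = (a :: b :: x').length ∧ c = '=') := by
              intro h
              apply hj
              refine ⟨?_, h.2⟩
              have := h.1
              simp only [List.length_cons] at this ⊢
              omega
            rw [if_neg hj, if_neg hj2]
            simp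

lemma pvPrevAfter_none (x : List Char) : pvPrevAfter none x = x.getLast? := by
  unfold pvPrevAfter
  cases x.getLast? <;> rfl

def pvMachine (cur : List Char) : List Char × List Char × Bool × Bool × Option Char :=
  match pvSf none cur with
  | none => (cur, [], false, false, cur.getLast?)
  | some j =>
    if j + 1 = cur.length then (cur.take j, [], false, true, cur.getLast?)
    else (cur.take j, cur.drop (j + 1), true, false, cur.getLast?)

def pvAltStep (col val : List Char) (sep pending : Bool) (prev : Option Char) (ch : Char) :
    List Char × List Char × Bool × Bool × Option Char :=
  let r := pvAltResolve col sep pending ch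
  pvAltRoute r.1 val r.2.1 r.2.2 prev ch

lemma pvPrevOk_bool (prev : Option Char) :
    (!(prev == some '<' || prev == some '>' || prev == some '!')) = pvPrevOk prev := rfl

set_option maxRecDepth 8192 in
lemma pvMachine_append (cur : List Char) (ch : Char) :
    pvMachine (cur ++ [ch]) =
      (pvAltStep (pvMachine cur).1 (pvMachine cur).2.1 (pvMachine cur).2.2.1
        (pvMachine cur).2.2.2.1 (pvMachine cur).2.2.2.2 ch) := by
  unfold pvMachine
  rw [pvSf_append cur ch none]
  rcases hsf : pvSf none cur with _ | j
  · simp only [pvPrevAfter_none]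
    by_cases hch : ch = '='
    · subst hch
      by_cases hpk : pvPrevOk cur.getLast? = true
      · have hlen : cur.length + 1 = (cur ++ ['=']).length := by simp
        have htake : (cur ++ ['=']).take cur.length = cur := by
          rw [List.take_append_of_le_length (le_refl _)]
          simp
        have hbf : (cur.getLast? == some '<' || cur.getLast? == some '>' || cur.getLast? == some '!') = false := by
          have h := hpk
          unfold pvPrevOk at h
          rwa [Bool.not_eq_true'] at h
        have hstep : pvAltStep cur [] false false cur.getLast? '=' = (cur, [], false, true, some '=') := by
          unfold pvAltStep pvAltResolve pvAltRoute
          simp [hbf]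
        rw [hstep, if_pos ⟨rfl, hpk⟩]
        simp [htake]
      · rw [Bool.not_eq_true] at hpk
        have hb : (cur.getLast? == some '<' || cur.getLast? == some '>' || cur.getLast? == some '!') = true := by
          unfold pvPrevOk at hpk
          rwa [Bool.not_eq_false'] at hpk
        simp [pvAltStep, pvAltResolve, pvAltRoute, hpk, hb]
    · simp [pvAltStep, pvAltResolve, pvAltRoute, pvPrevOk_bool, hch]
  · have hlt : j < cur.length := pvSf_lt hsf
    have hchar := pvSf_char cur none j hsf
    by_cases hpend : j + 1 = cur.length
    · have hgl : cur.getLast? = some '=' := by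
        rw [List.getLast?_eq_getElem?, ← hpend]
        simpa using hchar
      by_cases hch : ch = '='
      · subst hch
        have h2 : j + 1 + 1 = (cur ++ ['=']).length := by simp; omega
        have htake : (cur ++ ['=']).take (j + 1) = cur.take j ++ ['='] := by
          rw [List.take_append_of_le_length (by omega), List.take_succ, hchar]
          rfl
        have hok : pvPrevOk (some '=') = true := by decide
        have hcur : cur = List.take j cur ++ ['='] := by
          have ht : cur.take (j + 1) = cur := by
            rw [hpend]
            exact List.take_of_length_le (le_refl _)
          conv_lhs => rw [← ht, List.take_succ, hchar]
          rfl
        simp [pvAltStep, pvAltResolve, pvAltRoute, pvPrevOk_bool, hpend, h2, htake, hgl, hok]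
        exact hcur
      · have h2 : ¬ (j + 1 = (cur ++ [ch]).length) := by simp; omega
        have htake : (cur ++ [ch]).take j = cur.take j := List.take_append_of_le_length (by omega)
        have hdrop : (cur ++ [ch]).drop (j + 1) = [ch] := by
          rw [List.drop_append_of_le_length (by omega), hpend]
          simp
        simp [pvAltStep, pvAltResolve, pvAltRoute, pvPrevOk_bool, hpend, hch, h2, htake, hdrop]
    · have h2 : ¬ (j + 1 = (cur ++ [ch]).length) := by simp; omega
      have htake : (cur ++ [ch]).take j = cur.take j := List.take_append_of_le_length (by omega)
      have hdrop : (cur ++ [ch]).drop (j + 1) = cur.drop (j + 1) ++ [ch] :=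
        List.drop_append_of_le_length (by omega)
      simp [pvAltStep, pvAltResolve, pvAltRoute, pvPrevOk_bool, hpend, h2, htake, hdrop]
      omega

lemma pvFfeGo_eq : ∀ (x : List Char) (prev : Option Char) (i : Nat),
    pvFfeGo prev i x = (match pvSf prev x with
      | some j => ((i + j : Nat) : Int)
      | none => -1) := by
  intro x
  induction x with
  | nil => intro prev i; rfl
  | cons a rest ih =>
    intro prev i
    rw [pvFfeGo, pvSf_cons]
    by_cases ha : a = '='
    · subst ha
      by_cases hp : pvPrevOk prev = true
      · have hb : (prev == some '<' || prev == some '>' || prev == some '!') = false := by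
          unfold pvPrevOk at hp
          rwa [Bool.not_eq_true'] at hp
        by_cases hn : rest.head? = some '='
        · have hcond : ¬('=' = '=' ∧ pvPrevOk prev = true ∧ rest.head? ≠ some '=') := by tauto
          rw [if_pos (by simp), if_neg (by simp [hb]), if_pos (by simp [hn]), ih, if_neg hcond]
          cases pvSf (some '=') rest with
          | none => simp
          | some j => simp; ring
        · have hcond : ('=' = '=' ∧ pvPrevOk prev = true ∧ rest.head? ≠ some '=') := ⟨rfl, hp, hn⟩
          rw [if_pos (by simp), if_neg (by simp [hb]), if_neg (by simp [hn]), if_pos hcond]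
          simp
      · rw [Bool.not_eq_true] at hp
        have hb : (prev == some '<' || prev == some '>' || prev == some '!') = true := by
          unfold pvPrevOk at hp
          rwa [Bool.not_eq_false'] at hp
        have hcond : ¬('=' = '=' ∧ pvPrevOk prev = true ∧ rest.head? ≠ some '=') := by
          simp [hp]
        rw [if_pos (by simp), if_pos (by simp [hb]), ih, if_neg hcond]
        cases pvSf (some '=') rest with
        | none => simp
        | some j => simp; ring
    · have hcond : ¬(a = '=' ∧ pvPrevOk prev = true ∧ rest.head? ≠ some '=') := by tauto
      rw [if_neg (by simp [ha]), ih, if_neg hcond]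
      cases pvSf (some a) rest with
      | none => simp
      | some j => simp; ring

lemma pvWsFacts {c : Char} (h : PySem.Chars.isspace c = true) :
    c ≠ '=' ∧ pvPrevOk (some c) = true := by
  have hn : c.toNat ≠ 61 ∧ c.toNat ≠ 60 ∧ c.toNat ≠ 62 ∧ c.toNat ≠ 33 := by
    simp [PySem.Chars.isspace] at h
    omega
  refine ⟨?_, ?_⟩
  · intro he
    subst he
    exact hn.1 rfl
  · unfold pvPrevOk
    rw [Bool.not_eq_true']
    simp only [Bool.or_eq_false_iff, beq_eq_false_iff_ne, ne_eq, Option.some.injEq]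
    refine ⟨⟨?_, ?_⟩, ?_⟩ <;> intro he <;> subst he
    · exact hn.2.1 rfl
    · exact hn.2.2.1 rfl
    · exact hn.2.2.2 rfl

lemma pvSf_ws_left : ∀ (w : List Char), w.all PySem.Chars.isspace = true →
    ∀ (x : List Char) (prev : Option Char), pvPrevOk prev = true →
    pvSf prev (w ++ x) = (pvSf none x).map (· + w.length) := by
  intro w
  induction w with
  | nil =>
    intro _ x prev hp
    rw [List.nil_append, pvSf_congr x prev none (by rw [hp]; rfl)]
    cases pvSf none x <;> simp
  | cons a w ih =>
    intro hall x prev hp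
    have haws : PySem.Chars.isspace a = true := by
      exact List.all_eq_true.mp hall a (List.mem_cons_self ..)
    have hwall : w.all PySem.Chars.isspace = true := by
      rw [List.all_eq_true]
      intro y hy
      exact List.all_eq_true.mp hall y (List.mem_cons_of_mem _ hy)
    obtain ⟨hane, hapk⟩ := pvWsFacts haws
    rw [List.cons_append, pvSf_cons, if_neg (by tauto), ih hwall x (some a) hapk]
    cases pvSf none x <;> simp
    omega

lemma pvSf_ws_right : ∀ (t x : List Char) (prev : Option Char), t.all PySem.Chars.isspace = true →
    pvSf prev (x ++ t) = pvSf prev x := by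
  intro t
  induction t using List.reverseRecOn with
  | nil => intro x prev _; rw [List.append_nil]
  | append_singleton t c ih =>
    intro x prev hall
    have hcws : PySem.Chars.isspace c = true := by
      exact List.all_eq_true.mp hall c (by simp)
    have htall : t.all PySem.Chars.isspace = true := by
      rw [List.all_eq_true]
      intro y hy
      exact List.all_eq_true.mp hall y (by simp [hy])
    have hcne : c ≠ '=' := (pvWsFacts hcws).1
    rw [← List.append_assoc, pvSf_append]
    rcases hx : pvSf prev (x ++ t) with _ | j
    · rw [ih x prev htall] at hx
      rw [hx]
      simp [hcne]
    · rw [ih x prev htall] at hx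
      rw [hx]
      simp [hcne]

lemma pvStrip_ws_left (w y : List Char) (h : w.all PySem.Chars.isspace = true) :
    PySem.Chars.strip (w ++ y) = PySem.Chars.strip y := by
  unfold PySem.Chars.strip PySem.Chars.lstrip
  rw [List.dropWhile_append]
  have : (w.dropWhile PySem.Chars.isspace) = [] := by
    rw [List.dropWhile_eq_nil_iff]
    intro a ha
    exact List.all_eq_true.mp h a ha
  simp [this]

lemma pvRstrip_ws_right (z t : List Char) (h : t.all PySem.Chars.isspace = true) :
    PySem.Chars.rstrip (z ++ t) = PySem.Chars.rstrip z := by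
  unfold PySem.Chars.rstrip
  rw [List.reverse_append, List.dropWhile_append]
  have : (t.reverse.dropWhile PySem.Chars.isspace) = [] := by
    rw [List.dropWhile_eq_nil_iff]
    intro a ha
    exact List.all_eq_true.mp h a (List.mem_reverse.mp ha)
  simp [this]

lemma pvStrip_ws_right (y t : List Char) (h : t.all PySem.Chars.isspace = true) :
    PySem.Chars.strip (y ++ t) = PySem.Chars.strip y := by
  unfold PySem.Chars.strip
  by_cases hy : PySem.Chars.lstrip y = []
  · have hyall : y.all PySem.Chars.isspace = true := by
      rw [List.all_eq_true]
      intro a ha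
      unfold PySem.Chars.lstrip at hy
      exact List.dropWhile_eq_nil_iff.mp hy a ha
    have h1 : PySem.Chars.lstrip (y ++ t) = [] := by
      unfold PySem.Chars.lstrip at hy ⊢
      rw [List.dropWhile_append, hy]
      simp [List.dropWhile_eq_nil_iff]
      intro a ha
      exact List.all_eq_true.mp h a ha
    rw [h1, hy]
  · have h1 : PySem.Chars.lstrip (y ++ t) = PySem.Chars.lstrip y ++ t := by
      unfold PySem.Chars.lstrip at hy ⊢
      rw [List.dropWhile_append]
      simp [hy]
    rw [h1, pvRstrip_ws_right _ _ h]

lemma pvStrip_decomp (s : List Char) :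
    s = s.takeWhile PySem.Chars.isspace ++
      (PySem.Chars.strip s ++ ((s.dropWhile PySem.Chars.isspace).reverse.takeWhile PySem.Chars.isspace).reverse) := by
  conv_lhs => rw [← List.takeWhile_append_dropWhile (p := PySem.Chars.isspace) (l := s)]
  congr 1
  conv_lhs =>
    rw [← List.reverse_reverse (s.dropWhile PySem.Chars.isspace),
      ← List.takeWhile_append_dropWhile (p := PySem.Chars.isspace)
        (l := (s.dropWhile PySem.Chars.isspace).reverse),
      List.reverse_append]
  rfl

lemma pvStrip_cons_ne_nil {c : Char} (l : List Char) (hc : PySem.Chars.isspace c = false) :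
    PySem.Chars.strip (c :: l) ≠ [] := by
  unfold PySem.Chars.strip PySem.Chars.lstrip PySem.Chars.rstrip
  rw [List.dropWhile_cons, if_neg (by simp [hc])]
  intro hnil
  rw [List.reverse_eq_nil_iff, List.dropWhile_eq_nil_iff] at hnil
  have := hnil c (by simp)
  rw [hc] at this
  exact Bool.false_ne_true this

lemma pvStrip_head (s : List Char) {c : Char} {r : List Char}
    (h : PySem.Chars.strip s = c :: r) : PySem.Chars.isspace c = false := by
  have hd := pvStrip_decomp s
  rcases hz : PySem.Chars.lstrip s with _ | ⟨a, z⟩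
  · have : PySem.Chars.strip s = [] := by
      unfold PySem.Chars.strip
      rw [hz]
      rfl
    rw [this] at h
    exact absurd h (by simp)
  · have ha : PySem.Chars.isspace a = false := by
      have h2 := List.head?_dropWhile_not PySem.Chars.isspace s
      unfold PySem.Chars.lstrip at hz
      rw [hz] at h2
      simpa using h2
    -- strip s ++ tail = lstrip s, so if strip s = c :: r then c = a
    have hsplit : PySem.Chars.strip s ++
        ((PySem.Chars.lstrip s).reverse.takeWhile PySem.Chars.isspace).reverse = PySem.Chars.lstrip s := by
      unfold PySem.Chars.strip PySem.Chars.rstrip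
      conv_rhs =>
        rw [← List.reverse_reverse (PySem.Chars.lstrip s),
          ← List.takeWhile_append_dropWhile (p := PySem.Chars.isspace)
            (l := (PySem.Chars.lstrip s).reverse),
          List.reverse_append]
    rw [h, hz] at hsplit
    have : c = a := by
      have := congrArg List.head? hsplit
      simpa using this
    rwa [this]

def pvProcA (part : List Char) : List (String × String) :=
  let p := PySem.Chars.strip part
  if PySem.Chars.isIn ['='] p then
    if find_first_equals p > 0 then
      [(String.ofList (PySem.Chars.strip (PySem.List.slice p none (some (find_first_equals p)))),
        String.ofList (PySem.Chars.strip (PySem.List.slice p (some (find_first_equals p + 1)) none)))]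
    else []
  else []

lemma pvFin_key (u : List (String × String)) (cur : List Char) :
    pvFinalize u (pvMachine cur).1 (pvMachine cur).2.1 (pvMachine cur).2.2.1 (pvMachine cur).2.2.2.1
      = u ++ pvProcA cur := by
  have hdec := pvStrip_decomp cur
  set w := cur.takeWhile PySem.Chars.isspace with hw
  set p := PySem.Chars.strip cur with hp0
  set t := ((cur.dropWhile PySem.Chars.isspace).reverse.takeWhile PySem.Chars.isspace).reverse with ht
  have hwall : w.all PySem.Chars.isspace = true := List.all_takeWhile
  have htall : t.all PySem.Chars.isspace = true := by
    rw [ht, List.all_reverse]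
    exact List.all_takeWhile
  have hshift : pvSf none cur = (pvSf none p).map (· + w.length) := by
    conv_lhs => rw [hdec]
    rw [pvSf_ws_left w hwall (p ++ t) none rfl, pvSf_ws_right t p none htall]
  have hlen : cur.length = w.length + (p.length + t.length) := by
    conv_lhs => rw [hdec]
    simp
  rcases hsf : pvSf none p with _ | j
  · have hm0 : pvMachine cur = (cur, [], false, false, cur.getLast?) := by
      unfold pvMachine
      rw [hshift, hsf]
      simp
    have hffe : find_first_equals p = -1 := by
      unfold find_first_equals
      rw [pvFfeGo_eq p none 0, hsf]
    rw [hm0]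
    simp [pvFinalize, pvProcA, ← hp0, hffe]
  · have hjlt : j < p.length := pvSf_lt hsf
    have hchar := pvSf_char p none j hsf
    have hisin : PySem.Chars.isIn ['='] p = true := by
      rw [PySem.Chars.isIn_iff_infix]
      exact (List.singleton_infix_iff _ _).mpr (List.mem_of_getElem? hchar)
    have hffe : find_first_equals p = ((j : Nat) : Int) := by
      unfold find_first_equals
      rw [pvFfeGo_eq p none 0, hsf]
      simp
    have htake : cur.take (j + w.length) = w ++ p.take j := by
      conv_lhs => rw [hdec]
      rw [List.take_append, List.take_of_length_le (by omega)]
      congr 1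
      rw [show j + w.length - w.length = j by omega]
      exact List.take_append_of_le_length (by omega)
    have hcolstrip : PySem.Chars.strip (cur.take (j + w.length)) = PySem.Chars.strip (p.take j) := by
      rw [htake]
      exact pvStrip_ws_left _ _ hwall
    have hslice1 : PySem.List.slice p none (some ((j : Nat) : Int)) = p.take j := by
      rw [PySem.List.slice_to p (by positivity)]
      simp
    have hslice2 : PySem.List.slice p (some (((j : Nat) : Int) + 1)) none = p.drop (j + 1) := by
      rw [show ((j : Nat) : Int) + 1 = (((j + 1 : Nat)) : Int) by push_cast; ring]
      rw [PySem.List.slice_from p (by positivity)]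
      simp
    have hcondpos : 0 < j → PySem.Chars.strip (p.take j) ≠ [] := by
      intro hj
      rcases hpcons : p with _ | ⟨c, r⟩
      · rw [hpcons] at hjlt
        simp at hjlt
      · have hcns : PySem.Chars.isspace c = false := pvStrip_head cur (by rw [← hp0, hpcons])
        obtain ⟨k, rfl⟩ : ∃ k, j = k + 1 := ⟨j - 1, by omega⟩
        rw [List.take_succ_cons]
        exact pvStrip_cons_ne_nil _ hcns
    by_cases hpend : j + w.length + 1 = cur.length
    · have hdropnil : p.drop (j + 1) = [] := by
        rw [List.drop_eq_nil_iff]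
        omega
      have hm : pvMachine cur = (cur.take (j + w.length), [], false, true, cur.getLast?) := by
        unfold pvMachine
        rw [hshift, hsf]
        simp only [Option.map_some]
        rw [if_pos hpend]
      rw [hm]
      simp only [pvFinalize, pvProcA, ← hp0, hffe, hisin, hslice1, hslice2, hcolstrip, hdropnil, if_true]
      by_cases hj0 : j = 0
      · subst hj0
        have h1 : PySem.Chars.strip (List.take 0 p) = [] := rfl
        have h2 : PySem.Chars.strip ([] : List Char) = [] := rfl
        simp [h1, h2]
      · have hjpos : (0 : Int) < (j : Int) := by exact_mod_cast Nat.pos_of_ne_zero hj0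
        rw [if_pos (hcondpos (Nat.pos_of_ne_zero hj0)), if_pos hjpos]
    · have hm : pvMachine cur = (cur.take (j + w.length), cur.drop (j + w.length + 1), true, false, cur.getLast?) := by
        unfold pvMachine
        rw [hshift, hsf]
        simp only [Option.map_some]
        rw [if_neg hpend]
      have hdrop : cur.drop (j + w.length + 1) = p.drop (j + 1) ++ t := by
        conv_lhs => rw [hdec]
        rw [List.drop_append, List.drop_eq_nil_iff.mpr (by omega), List.nil_append]
        rw [show j + w.length + 1 - w.length = j + 1 by omega]
        exact List.drop_append_of_le_length (by omega)
      have hvalstrip : PySem.Chars.strip (cur.drop (j + w.length + 1)) = PySem.Chars.strip (p.drop (j + 1)) := by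
        rw [hdrop]
        exact pvStrip_ws_right _ _ htall
      rw [hm]
      simp only [pvFinalize, pvProcA, ← hp0, hffe, hisin, hslice1, hslice2, hcolstrip, hvalstrip, if_true]
      simp only [Bool.false_eq_true, if_false, if_true]
      by_cases hj0 : j = 0
      · subst hj0
        have h1 : PySem.Chars.strip (List.take 0 p) = [] := rfl
        have h2 : PySem.Chars.strip ([] : List Char) = [] := rfl
        simp [h1, h2]
      · have hjpos : (0 : Int) < (j : Int) := by exact_mod_cast Nat.pos_of_ne_zero hj0
        rw [if_pos (hcondpos (Nat.pos_of_ne_zero hj0)), if_pos hjpos]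

lemma pvSplit_acc : ∀ (l : List Char) (parts : List String) (cur : List Char) (d : Int) (b : Bool) (sc : Option Char),
    pvSmartSplitGo parts cur d b sc l = parts ++ pvSmartSplitGo [] cur d b sc l := by
  intro l
  induction l with
  | nil =>
    intro parts cur d b sc
    rw [pvSmartSplitGo, pvSmartSplitGo]
    split_ifs <;> simp
  | cons ch rest ih =>
    intro parts cur d b sc
    rw [pvSmartSplitGo, pvSmartSplitGo]
    split_ifs
    · exact ih parts (cur ++ [ch]) d true (some ch)
    · exact ih parts (cur ++ [ch]) d false none
    · exact ih parts (cur ++ [ch]) (d + 1) b sc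
    · exact ih parts (cur ++ [ch]) (d - 1) b sc
    · rw [ih (parts ++ [String.ofList cur]) [] d b sc]
      simp only [List.nil_append]
      rw [ih [String.ofList cur] [] d b sc]
      simp
    · exact ih parts (cur ++ [ch]) d b sc

lemma pvFin_resolve (u : List (String × String)) (col val : List Char) (sep pending : Bool)
    (ch : Char) (hch : (ch == '=') = false) :
    pvFinalize u (pvAltResolve col sep pending ch).1 val (pvAltResolve col sep pending ch).2.1
      (pvAltResolve col sep pending ch).2.2 = pvFinalize u col val sep pending := by
  cases pending <;> simp [pvAltResolve, pvFinalize, hch]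

lemma pvMachine_nil : pvMachine [] = ([], [], false, false, none) := rfl

lemma pvMain : ∀ (l : List Char) (u : List (String × String)) (cur col val : List Char)
    (sep pending : Bool) (prev : Option Char) (d : Int) (sc : Option Char),
    pvMachine cur = (col, val, sep, pending, prev) →
    pvAltGo u col val sep pending prev d sc l
      = u ++ (pvSmartSplitGo [] cur d sc.isSome sc l).flatMap (fun s => pvProcA s.toList) := by
  intro l
  induction l with
  | nil =>
    intro u cur col val sep pending prev d sc hm
    have hk := pvFin_key u cur
    rw [hm] at hk
    rw [pvAltGo, pvSmartSplitGo]
    by_cases hcur : cur ≠ []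
    · rw [if_pos hcur]
      simpa using hk
    · rw [if_neg hcur]
      push_neg at hcur
      subst hcur
      simpa [show pvProcA [] = ([] : List (String × String)) from rfl] using hk
  | cons ch rest ih =>
    intro u cur col val sep pending prev d sc hm
    have hstep := pvMachine_append cur ch
    rw [hm] at hstep
    simp only at hstep
    rw [pvAltGo, pvSmartSplitGo]
    cases sc with
    | none =>
      by_cases h1 : (ch == '\'' || ch == '"') = true
      · have hs : pvAltSplitStep d none ch = (d, some ch, false) := by
          simp [pvAltSplitStep, h1]
        simp only [hs, Bool.false_eq_true, if_false, Option.isSome_none, Bool.not_false, h1,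
          Bool.true_and, if_true, Bool.and_true]
        refine ih u (cur ++ [ch]) _ _ _ _ _ d (some ch) ?_
        exact hstep
      · by_cases h3 : (ch == '(') = true
        · have hs : pvAltSplitStep d none ch = (d + 1, none, false) := by
            simp [pvAltSplitStep, h1, h3]
          simp only [hs, Bool.false_eq_true, if_false, Option.isSome_none, Bool.not_false, h1, h3,
            Bool.true_and, if_true, Bool.and_true]
          refine ih u (cur ++ [ch]) _ _ _ _ _ (d + 1) none ?_
          exact hstep
        · by_cases h4 : (ch == ')') = true
          · have hs : pvAltSplitStep d none ch = (d - 1, none, false) := by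
              simp [pvAltSplitStep, h1, h3, h4]
            simp only [hs, Bool.false_eq_true, if_false, Option.isSome_none, Bool.not_false, h1, h3,
              h4, Bool.true_and, if_true, Bool.and_true]
            refine ih u (cur ++ [ch]) _ _ _ _ _ (d - 1) none ?_
            exact hstep
          · by_cases h5 : (ch == ',' && d == 0) = true
            · have hs : pvAltSplitStep d none ch = (d, none, true) := by
                simp [pvAltSplitStep, h1, h3, h4]
                simp at h5
                simp [h5]
              have hch : (ch == '=') = false := by
                simp at h5 ⊢
                rw [h5.1]
                decide
              simp only [hs, Bool.false_eq_true, if_false, Option.isSome_none, Bool.not_false, h1,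
                h3, h4, h5, Bool.true_and, if_true, Bool.and_true]
              have hk := pvFin_key u cur
              rw [hm] at hk
              rw [pvFin_resolve u col val sep pending ch hch, hk]
              rw [ih (u ++ pvProcA cur) [] [] [] false false none d none pvMachine_nil]
              simp only [List.nil_append]
              rw [pvSplit_acc rest [String.ofList cur] [] d false none]
              simp
            · have hs : pvAltSplitStep d none ch = (d, none, false) := by
                simp [pvAltSplitStep, h1, h3, h4]
                intro hc hd
                simp at h5
                exact absurd hd (h5 hc)
              simp only [hs, Bool.false_eq_true, if_false, Option.isSome_none, Bool.not_false, h1,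
                h3, h4, h5, Bool.true_and, if_true, Bool.and_true]
              refine ih u (cur ++ [ch]) _ _ _ _ _ d none ?_
              exact hstep
    | some sq =>
      by_cases h2 : (ch == sq) = true
      · have hs : pvAltSplitStep d (some sq) ch = (d, none, false) := by
          simp [pvAltSplitStep]
          simp at h2
          simp [h2]
        have h2' : (some ch == some sq) = true := by simpa using h2
        simp only [hs, Bool.false_eq_true, if_false, Option.isSome_some, Bool.not_true, h2, h2',
          Bool.false_and, Bool.and_false, if_true, Bool.true_and, if_false]
        refine ih u (cur ++ [ch]) _ _ _ _ _ d none ?_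
        exact hstep
      · have hs : pvAltSplitStep d (some sq) ch = (d, some sq, false) := by
          simp [pvAltSplitStep]
          simp at h2
          intro hc
          exact absurd hc h2
        have h2' : (some ch == some sq) = false := by simpa using h2
        simp only [hs, Bool.false_eq_true, if_false, Option.isSome_some, Bool.not_true, h2, h2',
          Bool.false_and, Bool.and_false, if_true, Bool.true_and, if_false]
        refine ih u (cur ++ [ch]) _ _ _ _ _ d (some sq) ?_
        exact hstep

lemma pvFoldA (parts : List String) :
    parts.foldl (fun updates part =>
      let p := PySem.Chars.strip part.toList
      if PySem.Chars.isIn ['='] p then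
        let eq_pos := find_first_equals p
        if eq_pos > 0 then
          updates ++ [(String.ofList (PySem.Chars.strip (PySem.List.slice p none (some eq_pos))),
                       String.ofList (PySem.Chars.strip (PySem.List.slice p (some (eq_pos + 1)) none)))]
        else updates
      else updates) []
      = parts.flatMap (fun part => pvProcA part.toList) := by
  have hbody : (fun (updates : List (String × String)) (part : String) =>
      let p := PySem.Chars.strip part.toList
      if PySem.Chars.isIn ['='] p then
        let eq_pos := find_first_equals p
        if eq_pos > 0 then
          updates ++ [(String.ofList (PySem.Chars.strip (PySem.List.slice p none (some eq_pos))),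
                       String.ofList (PySem.Chars.strip (PySem.List.slice p (some (eq_pos + 1)) none)))]
        else updates
      else updates)
      = fun updates part => updates ++ pvProcA part.toList := by
    funext updates part
    simp only [pvProcA]
    split_ifs <;> simp
  rw [hbody, PySem.List.foldl_append_eq_flatMap]
  simp

-- ===== VERDICT (by name: the statement is the Claim_ definition above) =====
theorem parse_set_clause_spec : Claim_equal_parse_set_clause := by
  intro set_clause _
  show parse_set_clause set_clause = parse_set_clause_alt set_clause
  unfold parse_set_clause parse_set_clause_alt smart_split_set_clause
  rw [pvFoldA, pvMain set_clause.toList [] [] [] [] false false none 0 none pvMachine_nil]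
  simp
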